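-- pv_equiv track=rewrite | github.com/itc-s23011/paiza | koisuru/osage.py | check_cd_recording
-- ===== SOURCE A (Python) =====
-- def check_cd_recording(n, m, songs):
--     total_time = 0
--     max_songs = 0
--
--     for t in songs:
--         total_time += t
--         if total_time <= n * 60:
--             max_songs += 1
--         else:
--             break
--
--     if max_songs == m:
--         return "OK"
--     else:
--         return str(max_songs)
-- ===== SOURCE B (Python) =====
-- def _fits(budget, songs):
--     # divide & conquer: length of maximal prefix of songs whose running sum stays <= budget
--     if not songs:
--         return 0
--     if len(songs) == 1:
--         return 1 if songs[0] <= budget else 0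
--     mid = len(songs) // 2
--     left, right = songs[:mid], songs[mid:]
--     k = _fits(budget, left)
--     if k < mid:
--         return k
--     return mid + _fits(budget - sum(left), right)
--
-- def check_cd_recording(n, m, songs):
--     count = _fits(n * 60, songs)
--     return "OK" if count == m else str(count)
-- ===== Notes on version B (the rewrite author's own statement) =====
-- stated objective: alternative
-- what changed: Replaces the single early-breaking accumulator loop by a divide-and-conquer helper that splits the song list in half, counts the fitting prefix in the left half, and only if the whole left half fits recurses on the right half with the budget reduced by the left half's sum.
import Mathlib
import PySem

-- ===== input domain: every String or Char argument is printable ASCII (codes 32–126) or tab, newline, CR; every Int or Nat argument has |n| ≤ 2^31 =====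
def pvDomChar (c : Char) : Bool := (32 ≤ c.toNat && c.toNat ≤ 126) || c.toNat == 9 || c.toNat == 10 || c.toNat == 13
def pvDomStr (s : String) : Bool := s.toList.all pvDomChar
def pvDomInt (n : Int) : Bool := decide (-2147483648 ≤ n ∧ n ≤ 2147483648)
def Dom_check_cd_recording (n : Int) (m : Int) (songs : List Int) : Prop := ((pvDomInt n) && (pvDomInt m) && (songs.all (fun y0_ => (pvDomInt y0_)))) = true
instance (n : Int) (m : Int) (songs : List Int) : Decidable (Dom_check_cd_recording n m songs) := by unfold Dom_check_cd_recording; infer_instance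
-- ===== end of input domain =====

-- B replaces A's early-breaking accumulator loop by a divide-and-conquer count of the
-- leading prefix run that fits in the budget (alternative algorithm, same cost).


-- ===== PORT A =====
-- loop over songs with (total_time, max_songs); `break` = stop recursing
def pvLoopA (limit : Int) (total : Int) : List Int → Int
  | [] => 0
  | t :: ts =>
    if total + t ≤ limit then 1 + pvLoopA limit (total + t) ts else 0

def check_cd_recording (n : Int) (m : Int) (songs : List Int) : String :=
  let max_songs := pvLoopA (n * 60) 0 songs
  if max_songs = m then "OK" else PySem.Int.toStr max_songs

-- ===== PORT B =====
-- _fits: divide & conquer on the list (split at len//2, recurse left; if the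
-- whole left half fits, recurse right with the budget reduced by its sum)
-- _fits, with a structural fuel counter (fuel = songs.length suffices; it only
-- makes the recursion structural and never runs out on the calls made)
def pvFitsGo : Nat → Int → List Int → Int
  | _, _, [] => 0
  | _, budget, [t] => if t ≤ budget then 1 else 0
  | 0, _, _ => 0
  | fuel + 1, budget, t :: u :: ts =>
    let mid := (t :: u :: ts).length / 2
    let left := (t :: u :: ts).take mid
    let right := (t :: u :: ts).drop mid
    let k := pvFitsGo fuel budget left
    if k < (mid : Int) then k else (mid : Int) + pvFitsGo fuel (budget - left.sum) right

def pvFits (budget : Int) (songs : List Int) : Int :=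
  pvFitsGo songs.length budget songs

def check_cd_recording_alt (n : Int) (m : Int) (songs : List Int) : String :=
  let count := pvFits (n * 60) songs
  if count = m then "OK" else PySem.Int.toStr count

-- ===== PRECONDITION & SPEC =====
def Spec_check_cd_recording (n : Int) (m : Int) (songs : List Int) (out : String) : Prop := out = check_cd_recording_alt n m songs
instance (n : Int) (m : Int) (songs : List Int) (out : String) : Decidable (Spec_check_cd_recording n m songs out) := by unfold Spec_check_cd_recording; infer_instance

-- ===== CLAIM (what is proved, stated in full; the proofs are below) =====
def Claim_equal_check_cd_recording : Prop := ∀ (n : Int) (m : Int) (songs : List Int), Dom_check_cd_recording n m songs → Spec_check_cd_recording n m songs (check_cd_recording n m songs)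

-- ===== LEMMAS AND PROOFS =====
-- proof-only helper: the simple budget-subtracting recursion both sides reduce to
def pvG (budget : Int) : List Int → Int
  | [] => 0
  | t :: ts => if t ≤ budget then 1 + pvG (budget - t) ts else 0

theorem pvLoopA_eq_pvG (limit : Int) (songs : List Int) :
    ∀ total : Int, pvLoopA limit total songs = pvG (limit - total) songs := by
  induction songs with
  | nil => intro total; simp [pvLoopA, pvG]
  | cons t ts ih =>
    intro total
    simp only [pvLoopA, pvG]
    by_cases h : total + t ≤ limit
    · rw [if_pos h, if_pos (by omega), ih (total + t)]
      congr 2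
      omega
    · rw [if_neg h, if_neg (by omega)]

theorem pvG_nonneg (budget : Int) (xs : List Int) : 0 ≤ pvG budget xs := by
  induction xs generalizing budget with
  | nil => simp [pvG]
  | cons t ts ih =>
    simp only [pvG]
    split_ifs with h
    · have := ih (budget - t); omega
    · omega

theorem pvG_le_length (budget : Int) (xs : List Int) : pvG budget xs ≤ (xs.length : Int) := by
  induction xs generalizing budget with
  | nil => simp [pvG]
  | cons t ts ih =>
    simp only [pvG, List.length_cons]
    split_ifs with h
    · have := ih (budget - t); push_cast; omega
    · push_cast; omega

theorem pvG_append (budget : Int) (l r : List Int) :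
    pvG budget (l ++ r)
      = if pvG budget l < (l.length : Int) then pvG budget l
        else (l.length : Int) + pvG (budget - l.sum) r := by
  induction l generalizing budget with
  | nil => simp [pvG]
  | cons t ts ih =>
    simp only [List.cons_append, pvG, List.length_cons, List.sum_cons]
    by_cases h : t ≤ budget
    · rw [if_pos h, if_pos h, ih (budget - t)]
      have hle := pvG_le_length (budget - t) ts
      have hnn := pvG_nonneg (budget - t) ts
      by_cases h2 : pvG (budget - t) ts < (ts.length : Int)
      · rw [if_pos h2, if_pos (by push_cast; omega)]
      · rw [if_neg h2, if_neg (by push_cast; omega)]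
        push_cast
        have : budget - t - ts.sum = budget - (t + ts.sum) := by ring
        rw [this]
        ring
    · rw [if_neg h, if_neg h,
          if_pos (by push_cast; have := pvG_nonneg budget (t :: ts); omega)]

theorem pvFitsGo_eq_pvG :
    ∀ (fuel : Nat) (songs : List Int), songs.length ≤ fuel →
      ∀ budget : Int, pvFitsGo fuel budget songs = pvG budget songs := by
  intro fuel
  induction fuel with
  | zero =>
    intro songs h budget
    have hnil : songs = [] := List.length_eq_zero_iff.mp (Nat.le_zero.mp h)
    subst hnil
    simp [pvFitsGo, pvG]
  | succ N ih =>
    intro songs h budget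
    match songs with
    | [] => simp [pvFitsGo, pvG]
    | [t] => simp [pvFitsGo, pvG]
    | t :: u :: ts =>
      rw [pvFitsGo]
      rw [ih _ (by simp only [List.length_take, List.length_cons] at *; omega) budget,
          ih _ (by simp only [List.length_drop, List.length_cons] at *; omega)]
      have hsplit := pvG_append budget
          ((t :: u :: ts).take ((t :: u :: ts).length / 2))
          ((t :: u :: ts).drop ((t :: u :: ts).length / 2))
      rw [List.take_append_drop] at hsplit
      rw [hsplit]
      have hlen : (((t :: u :: ts).take ((t :: u :: ts).length / 2)).length : Int)
          = (((t :: u :: ts).length / 2 : Nat) : Int) := by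
        simp only [List.length_take, List.length_cons]
        congr 1
        omega
      rw [hlen]

theorem pvFits_eq_pvG (budget : Int) (songs : List Int) :
    pvFits budget songs = pvG budget songs :=
  pvFitsGo_eq_pvG songs.length songs le_rfl budget

-- ===== VERDICT (by name: the statement is the Claim_ definition above) =====
theorem check_cd_recording_spec : Claim_equal_check_cd_recording := by
  intro n m songs _
  unfold Spec_check_cd_recording check_cd_recording check_cd_recording_alt
  rw [pvLoopA_eq_pvG (n * 60) songs 0, pvFits_eq_pvG]
  norm_num
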